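-- pv_equiv track=rewrite | github.com/ArqAlice/DSD2PCM-Converter | src/app/model/dsp.py | choose_cic_fir_decim_factors
-- ===== SOURCE A (Python) =====
-- def choose_cic_fir_decim_factors(total_decim: int, max_cic: int = 32) -> tuple[int, int]:
--     """総デシメーション total_decim を CIC + FIR に分解する。
--
--     Parameters
--     ----------
--     total_decim:
--         fs_in // fs_out の値（整数）。
--     max_cic:
--         CIC に割り当てる最大係数（2 の累乗を想定）。デフォルト 32。
--
--     Returns
--     -------
--     (D_cic, D_fir):
--         D_cic * D_fir = total_decim。
--         D_cic は power-of-two (<= max_cic) のうち最大のもの。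
--         D_cic == 1 の場合は「CIC を使わず全部 FIR」という意味。
--     """
--     if total_decim <= 1:
--         return 1, 1
--
--     # total_decim が 2 の累乗でない場合もとりあえず最大の 2 の累乗因子で分解
--     D_cic = 1
--     # 候補（大きい順）
--     candidates = [32, 16, 8, 4, 2]
--     for r in candidates:
--         if r > max_cic:
--             continue
--         if total_decim % r == 0:
--             D_cic = r
--             break
--
--     if D_cic == 1:
--         return 1, total_decim
--
--     D_fir = total_decim // D_cic
--     return int(D_cic), int(D_fir)
-- ===== SOURCE B (Python) =====
-- def choose_cic_fir_decim_factors(total_decim: int, max_cic: int = 32) -> tuple[int, int]: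
--     """Split total_decim into (D_cic, D_fir) with D_cic the largest power of two
--     factor of total_decim not exceeding min(max_cic, 32); built by ascending doubling."""
--     if total_decim <= 1:
--         return 1, 1
--     cap = min(max_cic, 32)
--     d = 1
--     while 2 * d <= cap and total_decim % (2 * d) == 0:
--         d *= 2
--     if d == 1:
--         return 1, total_decim
--     return d, total_decim // d
-- ===== Notes on version B (the rewrite author's own statement) =====
-- stated objective: simpler
-- what changed: Replaces A's descending scan over the fixed candidate list [32,16,8,4,2] (with continue/break) by an ascending doubling loop that grows the power-of-two CIC factor directly while it stays within min(max_cic,32) and still divides total_decim.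
import Mathlib
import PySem

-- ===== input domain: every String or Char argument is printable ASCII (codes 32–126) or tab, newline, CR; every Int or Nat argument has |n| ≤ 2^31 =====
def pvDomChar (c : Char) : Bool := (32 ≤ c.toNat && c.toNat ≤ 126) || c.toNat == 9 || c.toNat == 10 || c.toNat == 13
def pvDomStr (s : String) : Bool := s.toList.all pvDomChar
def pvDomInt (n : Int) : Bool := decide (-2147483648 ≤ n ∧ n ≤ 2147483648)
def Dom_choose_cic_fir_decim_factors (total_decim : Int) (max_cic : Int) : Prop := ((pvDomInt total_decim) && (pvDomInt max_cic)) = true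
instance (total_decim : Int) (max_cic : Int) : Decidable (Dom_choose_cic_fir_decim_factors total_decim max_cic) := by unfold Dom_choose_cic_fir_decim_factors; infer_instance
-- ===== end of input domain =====

-- B replaces A's descending scan over a fixed candidate list by an ascending doubling loop
-- that grows the power-of-two factor directly (objective: simpler; no speed claim).

-- ===== PORT A =====
-- A's 'for r in candidates: continue/break' loop, as structural recursion over the list
def pvFindCicA (td mc : Int) : List Int → Int
  | [] => 1
  | r :: rest =>
    if r > mc then pvFindCicA td mc rest
    else if PySem.Int.mod td r = 0 then r
    else pvFindCicA td mc rest

def choose_cic_fir_decim_factors (total_decim : Int) (max_cic : Int) : Int × Int :=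
  if total_decim ≤ 1 then (1, 1)
  else
    let dCic := pvFindCicA total_decim max_cic [32, 16, 8, 4, 2]
    if dCic = 1 then (1, total_decim)
    else (dCic, PySem.Int.floordiv total_decim dCic)

-- ===== PORT B =====
-- Source B's 'while 2*d <= cap and total_decim % (2*d) == 0: d *= 2'; fuel 6 is a totality
-- guard only: d starts at 1 and doubles while 2*d ≤ cap ≤ 32, so at most 5 iterations run.
def pvDoubleB (td cap : Int) : Nat → Int → Int
  | 0, d => d
  | fuel + 1, d =>
    if 2 * d ≤ cap ∧ PySem.Int.mod td (2 * d) = 0 then pvDoubleB td cap fuel (2 * d)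
    else d

def choose_cic_fir_decim_factors_alt (total_decim : Int) (max_cic : Int) : Int × Int :=
  if total_decim ≤ 1 then (1, 1)
  else
    let d := pvDoubleB total_decim (min max_cic 32) 6 1
    if d = 1 then (1, total_decim)
    else (d, PySem.Int.floordiv total_decim d)

-- ===== PRECONDITION & SPEC =====
def Spec_choose_cic_fir_decim_factors (total_decim : Int) (max_cic : Int) (out : Int × Int) : Prop := out = choose_cic_fir_decim_factors_alt total_decim max_cic
instance (total_decim : Int) (max_cic : Int) (out : Int × Int) : Decidable (Spec_choose_cic_fir_decim_factors total_decim max_cic out) := by unfold Spec_choose_cic_fir_decim_factors; infer_instance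

-- ===== CLAIM (what is proved, stated in full; the proofs are below) =====
def Claim_equal_choose_cic_fir_decim_factors : Prop := ∀ (total_decim : Int) (max_cic : Int), Dom_choose_cic_fir_decim_factors total_decim max_cic → Spec_choose_cic_fir_decim_factors total_decim max_cic (choose_cic_fir_decim_factors total_decim max_cic)

-- ===== LEMMAS AND PROOFS =====

-- the two loops compute the same power-of-two factor, for all inputs
set_option maxHeartbeats 1000000 in
theorem findCic_eq_double (td mc : Int) :
    pvFindCicA td mc [32, 16, 8, 4, 2] = pvDoubleB td (min mc 32) 6 1 := by
  have hm : ∀ (b : Int), 0 < b → PySem.Int.mod td b = td % b :=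
    fun b hb => PySem.Int.mod_eq_emod_of_pos hb
  rw [show (6:Nat) = 5+1 from rfl, pvDoubleB,
      show (5:Nat) = 4+1 from rfl, pvDoubleB,
      show (4:Nat) = 3+1 from rfl, pvDoubleB,
      show (3:Nat) = 2+1 from rfl, pvDoubleB,
      show (2:Nat) = 1+1 from rfl, pvDoubleB,
      show (1:Nat) = 0+1 from rfl, pvDoubleB, pvDoubleB]
  simp only [pvFindCicA, Int.reduceMul, hm 2 (by norm_num), hm 4 (by norm_num),
    hm 8 (by norm_num), hm 16 (by norm_num), hm 32 (by norm_num), hm 64 (by norm_num)]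
  simp only [show ((2:Int) ≤ min mc 32) = ¬((2:Int) > mc) from propext (by omega),
    show ((4:Int) ≤ min mc 32) = ¬((4:Int) > mc) from propext (by omega),
    show ((8:Int) ≤ min mc 32) = ¬((8:Int) > mc) from propext (by omega),
    show ((16:Int) ≤ min mc 32) = ¬((16:Int) > mc) from propext (by omega),
    show ((32:Int) ≤ min mc 32) = ¬((32:Int) > mc) from propext (by omega),
    show ((64:Int) ≤ min mc 32) = False from eq_false (by omega)]
  by_cases c2 : (2:Int) > mc <;> by_cases c4 : (4:Int) > mc <;> by_cases c8 : (8:Int) > mc <;>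
    by_cases c16 : (16:Int) > mc <;> by_cases c32 : (32:Int) > mc <;>
    by_cases d2 : td % 2 = 0 <;> by_cases d4 : td % 4 = 0 <;> by_cases d8 : td % 8 = 0 <;>
    by_cases d16 : td % 16 = 0 <;> by_cases d32 : td % 32 = 0 <;>
    first
      | (exfalso; omega)
      | (simp only [c2, c4, c8, c16, c32, d2, d4, d8, d16, d32, if_true, if_false,
          and_true, and_false, false_and, not_true, not_false_iff]
         try omega)

-- ===== VERDICT (by name: the statement is the Claim_ definition above) =====
theorem choose_cic_fir_decim_factors_spec : Claim_equal_choose_cic_fir_decim_factors := by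
  intro td mc _
  unfold Spec_choose_cic_fir_decim_factors choose_cic_fir_decim_factors choose_cic_fir_decim_factors_alt
  rw [findCic_eq_double]
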